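-- pv_equiv track=rewrite | github.com/1054/Crab.Toolkit.michi2 | bin/bin_magphys/magphys_highz/read_sed_results.py | rename_duplicates_in_a_string_list
-- ===== SOURCE A (Python) =====
-- from collections import Counter # Counter counts the number of occurrences of each item in a list. See -- https://stackoverflow.com/questions/30650474/python-rename-duplicates-in-list-with-progressive-numbers-without-sorting-list
--
-- def rename_duplicates_in_a_string_list(input_list):
--     # solve duplicates in read_cols
--     dupl_counts = Counter(input_list)
--     for dupl_item, dupl_count in dupl_counts.items():
--         if dupl_count > 1:
--             for dupl_suffix in range(1, dupl_count+1): # suffix starts at 1 and increases by 1 each time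
--                 if dupl_suffix > 1:
--                     input_list[input_list.index(dupl_item)] = dupl_item + '_%d' % (dupl_suffix) # replace each appearance of s
--                     # see -- https://stackoverflow.com/questions/30650474/python-rename-duplicates-in-list-with-progressive-numbers-without-sorting-list
--     return input_list
-- ===== SOURCE B (Python) =====
-- def rename_duplicates_in_a_string_list(input_list):
--     # One pass builds value -> list of occurrence indices; then every occurrence
--     # except the last gets a progressive '_2', '_3', ... suffix (in place).
--     positions = {}
--     for i, v in enumerate(input_list):
--         positions.setdefault(v, []).append(i)
--     for v, idxs in positions.items():
--         for k, idx in enumerate(idxs[:-1]):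
--             input_list[idx] = v + '_%d' % (k + 2)
--     return input_list
-- ===== Notes on version B (the rewrite author's own statement) =====
-- stated objective: faster
-- what changed: B builds a value->occurrence-index table in one enumerate pass and renames all but the last occurrence of each value directly at those indices, instead of A's Counter plus a repeated linear list.index rescan for every rename.
import Mathlib
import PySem

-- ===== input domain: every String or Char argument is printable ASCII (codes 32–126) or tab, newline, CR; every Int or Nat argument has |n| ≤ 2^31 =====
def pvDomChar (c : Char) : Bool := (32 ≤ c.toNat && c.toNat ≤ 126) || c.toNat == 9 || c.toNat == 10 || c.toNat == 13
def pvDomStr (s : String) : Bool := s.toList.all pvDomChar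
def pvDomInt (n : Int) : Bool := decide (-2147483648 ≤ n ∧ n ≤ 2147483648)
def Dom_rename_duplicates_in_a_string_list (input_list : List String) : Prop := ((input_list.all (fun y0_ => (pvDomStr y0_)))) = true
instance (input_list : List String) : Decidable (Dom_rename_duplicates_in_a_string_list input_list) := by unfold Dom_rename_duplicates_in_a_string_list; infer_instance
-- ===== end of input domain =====

-- B replaces A's repeated Counter+list.index rescans by one index table built in a single pass;
-- both Pythons mutate input_list in place and return it — the equivalence proved here is about the return value.

-- ===== PORT A =====
def rename_duplicates_in_a_string_list (input_list : List String) : List String :=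
  let dupl_counts := PySem.Dict.counter input_list
  dupl_counts.items.foldl (fun l p =>
    if (p.2 : Int) > 1 then
      (PySem.List.pyRange 1 (p.2 + 1) 1).foldl (fun l' dupl_suffix =>
        if dupl_suffix > 1 then
          match PySem.List.index? l' p.1 with
          | some i => l'.set i (p.1 ++ "_" ++ PySem.Int.toStr dupl_suffix)
          | none => l'  -- Python would raise ValueError here; unreachable: p.1 always still occurs in l'
        else l') l
    else l) input_list

-- ===== PORT B =====
def rename_duplicates_in_a_string_list_alt (input_list : List String) : List String :=
  let positions := (PySem.List.enumerate input_list 0).foldl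
      (fun d p => d.insert p.2 (d.getD p.2 [] ++ [p.1]))      -- positions.setdefault(v, []).append(i)
      (PySem.Dict.empty : PySem.Dict String (List Int))
  positions.items.foldl (fun l q =>
    (PySem.List.enumerate (PySem.List.slice q.2 none (some (-1))) 0).foldl   -- for k, idx in enumerate(idxs[:-1])
      (fun l' r => PySem.List.pySetD l' r.2 (q.1 ++ "_" ++ PySem.Int.toStr (r.1 + 2))) l) input_list

-- ===== PRECONDITION & SPEC =====
-- Pre_ excludes lists in which some duplicated value v co-occurs with one of the very strings
-- v_2 … v_count(v) that renaming would introduce: there A's frozen-Counter + live .index rescan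
-- renames accidental positions, and which occurrence gets which suffix is anybody's choice.
def Pre_rename_duplicates_in_a_string_list (input_list : List String) : Prop :=
  ∀ v ∈ input_list, ∀ s ∈ List.range (input_list.count v + 1),
    2 ≤ s → (v ++ "_" ++ PySem.Int.toStr (s : Int)) ∉ input_list
instance (input_list : List String) : Decidable (Pre_rename_duplicates_in_a_string_list input_list) := by
  unfold Pre_rename_duplicates_in_a_string_list; infer_instance
def pvWitness_rename_duplicates_in_a_string_list : List String := ["a", "b", "a", "c", "a", "b"]
def Spec_rename_duplicates_in_a_string_list (input_list : List String) (out : List String) : Prop := out = rename_duplicates_in_a_string_list_alt input_list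
instance (input_list : List String) (out : List String) : Decidable (Spec_rename_duplicates_in_a_string_list input_list out) := by unfold Spec_rename_duplicates_in_a_string_list; infer_instance

-- ===== CLAIM (what is proved, stated in full; the proofs are below) =====
def Claim_equal_rename_duplicates_in_a_string_list : Prop := ∀ (input_list : List String), Dom_rename_duplicates_in_a_string_list input_list → Pre_rename_duplicates_in_a_string_list input_list → Spec_rename_duplicates_in_a_string_list input_list (rename_duplicates_in_a_string_list input_list)

-- ===== LEMMAS AND PROOFS =====

def occ (v : String) : List String → List Nat
  | [] => []
  | x :: t => if x = v then 0 :: (occ v t).map (· + 1) else (occ v t).map (· + 1)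

theorem occ_length (v : String) (l : List String) : (occ v l).length = l.count v := by
  induction l with
  | nil => rfl
  | cons x t ih =>
    simp only [occ, List.count_cons]
    split <;> rename_i h <;> simp [List.length_map, ih, h, beq_iff_eq]

theorem mem_occ (v : String) (l : List String) (j : Nat) : j ∈ occ v l ↔ l[j]? = some v := by
  induction l generalizing j with
  | nil => simp [occ]
  | cons x t ih =>
    cases j with
    | zero => by_cases h : x = v <;> simp [occ, h]
    | succ n => by_cases h : x = v <;> simp [occ, h, ih]

theorem occ_eq_nil_of_not_mem (v : String) (l : List String) (h : v ∉ l) : occ v l = [] := by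
  induction l with
  | nil => rfl
  | cons x t ih => simp_all [occ]; intro hx; exact absurd hx.symm h.1

theorem index?_eq_head_occ (v : String) (l : List String) :
    PySem.List.index? l v = (occ v l).head? := by
  induction l with
  | nil => rfl
  | cons x t ih =>
    by_cases h : x = v
    · subst h; rw [PySem.List.index?_cons_self]; simp [occ]
    · rw [PySem.List.index?_cons_of_ne t h, ih]
      simp only [occ, if_neg h]
      cases occ v t <;> simp

theorem occ_set_head (v w : String) (l : List String) (p : Nat) (rest : List Nat)
    (h : occ v l = p :: rest) (hw : w ≠ v) : occ v (l.set p w) = rest := by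
  induction l generalizing p rest with
  | nil => simp [occ] at h
  | cons x t ih =>
    by_cases hx : x = v
    · simp only [occ, if_pos hx] at h
      have hp : p = 0 := (List.cons.injEq .. ▸ h).1.symm
      have hrest : (occ v t).map (· + 1) = rest := (List.cons.injEq .. ▸ h).2
      subst hp
      rw [List.set_cons_zero]
      simp only [occ, if_neg hw]
      exact hrest
    · simp only [occ, if_neg hx] at h
      cases hocc : occ v t with
      | nil => rw [hocc] at h; simp at h
      | cons p' rest' =>
        rw [hocc, List.map_cons] at h
        have hp : p = p' + 1 := (List.cons.injEq .. ▸ h).1.symm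
        have hrest : (rest'.map (· + 1)) = rest := (List.cons.injEq .. ▸ h).2
        subst hp
        rw [List.set_cons_succ]
        simp only [occ, if_neg hx]
        rw [ih p' rest' hocc]
        exact hrest

theorem occ_set_not_mem (v w : String) (l : List String) (p : Nat)
    (hw : w ≠ v) (hp : p ∉ occ v l) : occ v (l.set p w) = occ v l := by
  induction l generalizing p with
  | nil => rfl
  | cons x t ih =>
    cases p with
    | zero =>
      by_cases hx : x = v
      · exfalso; apply hp; simp [occ, hx]
      · simp [occ, hx, if_neg hw]
    | succ n =>
      have hn : n ∉ occ v t := by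
        intro hmem; apply hp
        by_cases hx : x = v <;> simp [occ, hx] <;> exact hmem
      by_cases hx : x = v <;> simp [occ, hx, List.set_cons_succ, ih n hn]

theorem occ_append_singleton (v x : String) (l : List String) :
    occ v (l ++ [x]) = occ v l ++ (if x = v then [l.length] else []) := by
  induction l with
  | nil => by_cases h : x = v <;> simp [occ, h]
  | cons y t ih =>
    simp only [List.cons_append, occ, ih]
    by_cases hy : y = v <;> by_cases h : x = v <;> simp [hy, h, List.map_append]

theorem suffix_ne_self (v : String) (s : Int) : v ++ "_" ++ PySem.Int.toStr s ≠ v := by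
  intro h
  have := congrArg String.length h
  rw [String.length_append, String.length_append] at this
  have h1 : (1:Nat) ≤ ("_" : String).length := by decide
  omega

def writeSeq (v : String) : List String → List Nat → Int → List String
  | l, [], _ => l
  | l, [_], _ => l
  | l, p :: q :: rest, s => writeSeq v (l.set p (v ++ "_" ++ PySem.Int.toStr s)) (q :: rest) (s + 1)

theorem get?_map_pairs (keys : List String) (f : String → List Int) (x : String) :
    (PySem.Dict.mk (keys.map (fun k => (k, f k)))).get? x
      = if x ∈ keys then some (f x) else none := by
  induction keys with
  | nil => simp [PySem.Dict.get?]
  | cons k t ih =>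
    rw [List.map_cons, PySem.Dict.get?_mk_cons, ih]
    by_cases h : k = x
    · subst h; simp
    · have hxk : ¬ x = k := fun h' => h h'.symm
      simp [beq_iff_eq, hxk, h]

theorem writeSeq_occ_preserve (v w : String) (ps : List Nat) :
    ∀ (l : List String) (s0 : Int),
    (∀ p ∈ ps, p ∉ occ w l) →
    (∀ s : Int, s0 ≤ s → s ≤ s0 + ps.length - 2 → v ++ "_" ++ PySem.Int.toStr s ≠ w) →
    occ w (writeSeq v l ps s0) = occ w l := by
  induction ps with
  | nil => intro l s0 _ _; simp [writeSeq]
  | cons p t ih =>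
    intro l s0 hp hv
    cases t with
    | nil => simp [writeSeq]
    | cons q rest =>
      simp only [writeSeq]
      have hne : v ++ "_" ++ PySem.Int.toStr s0 ≠ w := by
        apply hv s0 le_rfl; simp; omega
      have hset : occ w (l.set p (v ++ "_" ++ PySem.Int.toStr s0)) = occ w l :=
        occ_set_not_mem w _ l p hne (hp p (by simp))
      rw [ih _ (s0 + 1) (fun r hr => by rw [hset]; exact hp r (by simp [hr]))
            (fun s hs1 hs2 => hv s (by omega) (by simp at hs2 ⊢; omega))]
      exact hset

theorem b_inner_eq (v : String) (ps : List Nat) :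
    ∀ (l : List String) (a : Int),
    (PySem.List.enumerate ((ps.map (fun n => (n : Int))).dropLast) a).foldl
        (fun l' r => PySem.List.pySetD l' r.2 (v ++ "_" ++ PySem.Int.toStr (r.1 + 2))) l
      = writeSeq v l ps (a + 2) := by
  induction ps with
  | nil => intro l a; simp [writeSeq]
  | cons p t ih =>
    intro l a
    cases t with
    | nil => simp [writeSeq]
    | cons q rest =>
      have hdl : ((p :: q :: rest).map (fun n => (n : Int))).dropLast
          = (p : Int) :: ((q :: rest).map (fun n => (n : Int))).dropLast := by
        simp [List.dropLast_cons_of_ne_nil]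
      rw [hdl, PySem.List.enumerate_cons, List.foldl_cons]
      simp only [PySem.List.pySetD_natCast]
      rw [ih _ (a + 1)]
      simp only [writeSeq]
      congr 1
      omega

theorem pyRange_one_nil {a b : Int} (h : b ≤ a) : PySem.List.pyRange a b = [] := by
  rw [PySem.List.pyRange_of_pos _ _ (by omega : (0:Int) < 1), if_neg (by omega)]
  simp

theorem a_inner_eq (v : String) (ps : List Nat) :
    ∀ (l : List String) (s0 : Int), occ v l = ps →
    (PySem.List.pyRange s0 (s0 + ps.length - 1) 1).foldl
        (fun l' s => match PySem.List.index? l' v with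
          | some i => l'.set i (v ++ "_" ++ PySem.Int.toStr s)
          | none => l') l
      = writeSeq v l ps s0 := by
  induction ps with
  | nil =>
    intro l s0 _
    rw [pyRange_one_nil (by simp only [List.length_nil, Nat.cast_zero]; omega)]
    simp [writeSeq]
  | cons p t ih =>
    intro l s0 hocc
    cases t with
    | nil =>
      rw [pyRange_one_nil (by simp only [List.length_cons, List.length_nil]; push_cast; omega)]
      simp [writeSeq]
    | cons q rest =>
      rw [List.length_cons, PySem.List.pyRange_one_cons (by simp only [List.length_cons]; push_cast; omega)]
      simp only [List.foldl_cons]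
      rw [index?_eq_head_occ, hocc]
      simp only [List.head?_cons]
      have hset : occ v (l.set p (v ++ "_" ++ PySem.Int.toStr s0)) = q :: rest :=
        occ_set_head v _ l p _ hocc (suffix_ne_self v s0)
      have hrec := ih (l.set p (v ++ "_" ++ PySem.Int.toStr s0)) (s0 + 1) hset
      have hb : s0 + (((q :: rest).length + 1 : Nat) : Int) - 1
          = s0 + 1 + (((q :: rest).length : Nat) : Int) - 1 := by push_cast; omega
      rw [hb, hrec]
      simp [writeSeq]

def posDict (l : List String) : PySem.Dict String (List Int) :=
  (PySem.List.enumerate l 0).foldl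
    (fun d p => d.insert p.2 (d.getD p.2 [] ++ [p.1]))
    (PySem.Dict.empty : PySem.Dict String (List Int))

theorem keys_posDict_items {l : List String} {ks : List String} {f : String → List Int}
    (h : (posDict l).items = ks.map (fun k => (k, f k))) : (posDict l).keys = ks := by
  have hk : (posDict l).keys = (posDict l).items.map (·.1) := rfl
  rw [hk, h, List.map_map]
  exact List.map_id ks

theorem posDict_items (l : List String) :
    (posDict l).items = (PySem.Set.ofList l).map (fun k => (k, (occ k l).map (fun n => (n : Int)))) := by
  induction l using List.reverseRecOn with
  | nil => rfl
  | append_singleton t x ih =>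
    have hfold : posDict (t ++ [x])
        = (posDict t).insert x ((posDict t).getD x [] ++ [((0:Int) + t.length)]) := by
      simp [posDict, PySem.List.enumerate_append, List.foldl_append,
        PySem.List.enumerate_cons, PySem.List.enumerate_nil]
    have hget : (posDict t).get? x
        = if x ∈ PySem.Set.ofList t then some ((occ x t).map (fun n => (n : Int))) else none := by
      conv_lhs => rw [show posDict t = PySem.Dict.mk ((posDict t).items) from rfl, ih]
      exact get?_map_pairs _ _ _
    have hkeys : (posDict t).keys = PySem.Set.ofList t := keys_posDict_items ih
    have hof : PySem.Set.ofList (t ++ [x])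
        = if x ∈ PySem.Set.ofList t then PySem.Set.ofList t else PySem.Set.ofList t ++ [x] := by
      rw [PySem.Set.ofList_eq_foldl, List.foldl_append, ← PySem.Set.ofList_eq_foldl]
      simp [PySem.Set.add, PySem.Set.contains]
    by_cases hx : x ∈ PySem.Set.ofList t
    · rw [hfold, PySem.Dict.items_insert_of_contains _ _
        (by rw [PySem.Dict.contains_iff_mem_keys, hkeys]; exact hx), ih, hof, if_pos hx,
        List.map_map]
      apply List.map_congr_left
      intro k hk
      by_cases hkx : k = x
      · subst hkx
        simp only [Function.comp_apply, beq_self_eq_true, if_pos]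
        have : (posDict t).getD k [] = (occ k t).map (fun n => (n : Int)) := by
          show ((posDict t).get? k).getD [] = _
          rw [hget, if_pos hx]
          rfl
        rw [occ_append_singleton]
        simp [this]
      · have : (k == x) = false := by simp [hkx]
        simp only [Function.comp_apply, this, if_neg, Bool.false_eq_true, not_false_iff]
        rw [occ_append_singleton]
        have hxk : ¬ x = k := fun h => hkx h.symm
        simp [hxk]
    · rw [hfold, PySem.Dict.items_insert_of_not_contains _ _
        (by rw [← Bool.not_eq_true, PySem.Dict.contains_iff_mem_keys, hkeys]; exact hx), ih, hof,
        if_neg hx, List.map_append]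
      congr 1
      · apply List.map_congr_left
        intro k hk
        have hkx : ¬ x = k := fun h => hx (h ▸ hk)
        rw [occ_append_singleton]
        simp [hkx]
      · have hxt : x ∉ t := fun h => hx ((PySem.Set.mem_ofList t x).2 h)
        have : (posDict t).getD x [] = [] := by
          show ((posDict t).get? x).getD [] = _
          rw [hget, if_neg hx]; rfl
        rw [this]
        simp [occ_append_singleton, occ_eq_nil_of_not_mem x t hxt]

theorem main_fold (l0 : List String)
    (hpre : Pre_rename_duplicates_in_a_string_list l0) :
    ∀ (ks : List String) (l : List String), ks.Nodup → (∀ v ∈ ks, v ∈ l0) →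
    (∀ v ∈ ks, occ v l = occ v l0) →
    ks.foldl (fun l v =>
        if ((l0.count v : Int) > 1) then
          (PySem.List.pyRange 1 ((l0.count v : Int) + 1) 1).foldl (fun l' s =>
            if s > 1 then
              match PySem.List.index? l' v with
              | some i => l'.set i (v ++ "_" ++ PySem.Int.toStr s)
              | none => l'
            else l') l
        else l) l
    = ks.foldl (fun l v =>
        (PySem.List.enumerate (PySem.List.slice ((occ v l0).map (fun n => (n : Int))) none (some (-1))) 0).foldl
          (fun l' r => PySem.List.pySetD l' r.2 (v ++ "_" ++ PySem.Int.toStr (r.1 + 2))) l) l := by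
  intro ks
  induction ks with
  | nil => intro l _ _ _; rfl
  | cons v kt ih =>
    intro l hnd hmem hocc
    simp only [List.foldl_cons]
    have hvl0 : v ∈ l0 := hmem v (by simp)
    have hoccv : occ v l = occ v l0 := hocc v (by simp)
    have hlen : (occ v l0).length = l0.count v := occ_length v l0
    have hvkt : v ∉ kt := (List.nodup_cons.mp hnd).1
    -- the two inner loops produce the same list
    have hstep :
        (if ((l0.count v : Int) > 1) then
          (PySem.List.pyRange 1 ((l0.count v : Int) + 1) 1).foldl (fun l' s =>
            if s > 1 then
              match PySem.List.index? l' v with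
              | some i => l'.set i (v ++ "_" ++ PySem.Int.toStr s)
              | none => l'
            else l') l
        else l)
        = (PySem.List.enumerate (PySem.List.slice ((occ v l0).map (fun n => (n : Int))) none (some (-1))) 0).foldl
            (fun l' r => PySem.List.pySetD l' r.2 (v ++ "_" ++ PySem.Int.toStr (r.1 + 2))) l := by
      rw [PySem.List.slice_to_neg_one, b_inner_eq v (occ v l0) l 0]
      by_cases h2 : 2 ≤ l0.count v
      · rw [if_pos (by omega)]
        rw [show ((l0.count v : Int) + 1) = 1 + 1 + ((occ v l0).length : Int) - 1 by
          rw [hlen]; push_cast; omega]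
        rw [PySem.List.pyRange_one_cons (by push_cast; omega), List.foldl_cons]
        simp only [show ¬ ((1:Int) > 1) by omega, if_false]
        rw [PySem.List.foldl_congr_mem _ _ (fun l' s =>
            match PySem.List.index? l' v with
            | some i => l'.set i (v ++ "_" ++ PySem.Int.toStr s)
            | none => l') _
          (by intro acc x hx
              have := PySem.List.mem_pyRange_one.mp hx
              rw [if_pos (by omega)])]
        rw [a_inner_eq v (occ v l0) l (1+1) hoccv]
        norm_num
      · rw [if_neg (by omega)]
        have h1 : l0.count v ≤ 1 := by omega
        cases hps : occ v l0 with
        | nil => simp [writeSeq]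
        | cons p t =>
          cases t with
          | nil => simp [writeSeq]
          | cons q r => rw [hps] at hlen; simp at hlen; omega
    rw [hstep]
    -- the invariant is preserved for the remaining keys
    apply ih _ (List.nodup_cons.mp hnd).2 (fun w hw => hmem w (by simp [hw]))
    intro w hw
    rw [PySem.List.slice_to_neg_one, b_inner_eq v (occ v l0) l 0]
    have hwv : v ≠ w := fun h => hvkt (h ▸ hw)
    have hpres : occ w (writeSeq v l (occ v l0) (0 + 2)) = occ w l := by
      apply writeSeq_occ_preserve
      · intro p hp hpw
        have h1 : l[p]? = some v := (mem_occ v l p).mp (hoccv ▸ hp)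
        have h2 : l[p]? = some w := (mem_occ w l p).mp hpw
        exact hwv (by rw [h1] at h2; exact (Option.some.injEq .. ▸ h2))
      · intro s hs1 hs2 heq
        have hsn : ((s.toNat : Int)) = s := Int.toNat_of_nonneg (by omega)
        have hcount : s.toNat ∈ List.range (l0.count v + 1) := by
          rw [List.mem_range]; omega
        have := hpre v hvl0 s.toNat hcount (by omega)
        apply this
        rw [hsn, heq]
        exact hmem w (by simp [hw])
    rw [hpres]
    exact hocc w (by simp [hw])

-- ===== VERDICT (by name: the statement is the Claim_ definition above) =====
theorem rename_duplicates_in_a_string_list_spec : Claim_equal_rename_duplicates_in_a_string_list := by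
  intro l0 _hdom hpre
  unfold Spec_rename_duplicates_in_a_string_list
  have hA : rename_duplicates_in_a_string_list l0
      = (PySem.Set.ofList l0).foldl (fun l v =>
          if ((l0.count v : Int) > 1) then
            (PySem.List.pyRange 1 ((l0.count v : Int) + 1) 1).foldl (fun l' s =>
              if s > 1 then
                match PySem.List.index? l' v with
                | some i => l'.set i (v ++ "_" ++ PySem.Int.toStr s)
                | none => l'
              else l') l
          else l) l0 := by
    show ((PySem.Dict.counter l0).items.foldl _ l0) = _
    rw [PySem.Dict.items_counter, List.foldl_map]
  have hB : rename_duplicates_in_a_string_list_alt l0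
      = (PySem.Set.ofList l0).foldl (fun l v =>
          (PySem.List.enumerate (PySem.List.slice ((occ v l0).map (fun n => (n : Int))) none (some (-1))) 0).foldl
            (fun l' r => PySem.List.pySetD l' r.2 (v ++ "_" ++ PySem.Int.toStr (r.1 + 2))) l) l0 := by
    show ((posDict l0).items.foldl _ l0) = _
    rw [posDict_items, List.foldl_map]
  rw [hA, hB]
  exact main_fold l0 hpre (PySem.Set.ofList l0) l0 (PySem.Set.nodup_ofList l0)
    (fun v hv => (PySem.Set.mem_ofList l0 v).mp hv) (fun _ _ => rfl)
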